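-- pv_equiv track=rewrite | github.com/harshitshiroiya/assigner-python | assigner/assign.py | possible_team_members
-- ===== SOURCE A (Python) =====
-- def possible_team_members(groupList,Studentlist):
--
--     possible_team = groupList[len(groupList)-1]
--     final_groups = []
--     for group in groupList:
--         for student in group:
--             final_groups.append(student)
--
--     two_members= []
--     for student in Studentlist:
--         if student not in final_groups:
--             team = [possible_team[0], student]
--             if(sorted(team) not in two_members):
--                 two_members.append(sorted(team))
--
--     three_members = []
--     for groups in two_members:
--         for student in Studentlist:
--             if student not in final_groups and student not in groups:
--                 team = [groups[0],groups[1], student]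
--                 if(sorted(team) not in three_members):
--                     three_members.append(sorted(team))
--
--     for groups in two_members:
--         groupList.append(groups)
--
--     for groups in three_members:
--         groupList.append(groups)
--
--     return groupList
-- ===== SOURCE B (Python) =====
-- def possible_team_members(groupList, Studentlist):
--     assigned = set()
--     for group in groupList:
--         assigned.update(group)
--     avail = list(dict.fromkeys(s for s in Studentlist if s not in assigned))
--     if avail:
--         p0 = groupList[-1][0]
--         groupList.extend(sorted([p0, s]) for s in avail)
--         groupList.extend(sorted([p0, avail[i], avail[j]])
--                          for i in range(len(avail))
--                          for j in range(i + 1, len(avail)))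
--     return groupList
-- ===== Notes on version B (the rewrite author's own statement) =====
-- stated objective: faster
-- what changed: A dedups by rescanning its growing output lists inside nested loops over Studentlist; B builds the set of assigned students and an ordered deduped availability list once, then emits the pair teams by a single map and the triple teams by one combinations pass, removing the quadratic membership rescans.
import Mathlib
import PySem

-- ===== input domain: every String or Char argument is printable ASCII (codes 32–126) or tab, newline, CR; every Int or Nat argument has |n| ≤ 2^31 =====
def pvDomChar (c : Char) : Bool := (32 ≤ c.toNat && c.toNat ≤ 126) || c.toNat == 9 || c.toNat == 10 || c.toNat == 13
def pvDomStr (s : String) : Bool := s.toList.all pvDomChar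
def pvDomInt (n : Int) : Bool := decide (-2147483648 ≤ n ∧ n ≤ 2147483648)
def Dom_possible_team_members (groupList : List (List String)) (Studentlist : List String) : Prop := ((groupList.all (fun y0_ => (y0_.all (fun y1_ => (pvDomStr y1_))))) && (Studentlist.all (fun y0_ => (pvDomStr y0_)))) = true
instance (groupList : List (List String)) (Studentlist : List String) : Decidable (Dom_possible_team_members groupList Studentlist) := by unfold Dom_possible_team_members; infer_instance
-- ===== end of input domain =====

-- B replaces A's rescanning dedup loops by an assigned-set, a deduped availability list and one
-- combinations pass (objective: faster, measured).  A mutates groupList in place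
-- (appends the new teams); B performs the same mutation in Python — the theorems are about the return value.

-- ===== PORT A =====
def possible_team_members (groupList : List (List String)) (Studentlist : List String) : List (List String) :=
  let possible_team := PySem.List.pyGetD groupList ((groupList.length : Int) - 1) []
  let final_groups := groupList.foldl (fun acc group => group.foldl (fun a s => a ++ [s]) acc) []
  let two_members := Studentlist.foldl (fun tm student =>
    if student ∉ final_groups then
      if PySem.List.sorted [PySem.List.pyGetD possible_team 0 "", student] (fun x => x) false ∉ tm then
        tm ++ [PySem.List.sorted [PySem.List.pyGetD possible_team 0 "", student] (fun x => x) false]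
      else tm
    else tm) []
  let three_members := two_members.foldl (fun th groups =>
    Studentlist.foldl (fun th student =>
      if student ∉ final_groups ∧ student ∉ groups then
        if PySem.List.sorted [PySem.List.pyGetD groups 0 "", PySem.List.pyGetD groups 1 "", student] (fun x => x) false ∉ th then
          th ++ [PySem.List.sorted [PySem.List.pyGetD groups 0 "", PySem.List.pyGetD groups 1 "", student] (fun x => x) false]
        else th
      else th) th) []
  let gl1 := two_members.foldl (fun gl g => gl ++ [g]) groupList
  three_members.foldl (fun gl g => gl ++ [g]) gl1

-- ===== PORT B =====
def possible_team_members_alt (groupList : List (List String)) (Studentlist : List String) : List (List String) :=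
  let assigned : PySem.Set String := groupList.foldl (fun s group => PySem.Set.update s group) PySem.Set.empty
  let avail := PySem.List.dedup (Studentlist.filter (fun s => !(PySem.Set.contains assigned s)))
  if avail.isEmpty then groupList
  else
    let p0 := PySem.List.pyGetD (PySem.List.pyGetD groupList (-1) []) 0 ""
    let two := avail.map (fun s => PySem.List.sorted [p0, s] (fun x => x) false)
    let three := (PySem.List.pyRange 0 (avail.length : Int) 1).flatMap (fun i =>
      (PySem.List.pyRange (i + 1) (avail.length : Int) 1).map (fun j =>
        PySem.List.sorted [p0, PySem.List.pyGetD avail i "", PySem.List.pyGetD avail j ""] (fun x => x) false))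
    groupList ++ two ++ three

-- ===== PRECONDITION & SPEC =====
-- Pre_ excludes exactly the inputs where Python A raises IndexError: an empty groupList
-- (groupList[-1] fails), and an empty last group when some student is unassigned
-- (possible_team[0] fails).
def Pre_possible_team_members (groupList : List (List String)) (Studentlist : List String) : Prop :=
  groupList ≠ [] ∧ (groupList.getLastD [] = [] → ∀ s ∈ Studentlist, s ∈ groupList.flatten)
instance (groupList : List (List String)) (Studentlist : List String) : Decidable (Pre_possible_team_members groupList Studentlist) := by unfold Pre_possible_team_members; infer_instance
def pvWitness_possible_team_members : List (List String) × List String := ([["a"], ["b", "c"]], ["d", "e", "d", "b"])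

def Spec_possible_team_members (groupList : List (List String)) (Studentlist : List String) (out : List (List String)) : Prop := out = possible_team_members_alt groupList Studentlist
instance (groupList : List (List String)) (Studentlist : List String) (out : List (List String)) : Decidable (Spec_possible_team_members groupList Studentlist out) := by unfold Spec_possible_team_members; infer_instance

-- ===== CLAIM (what is proved, stated in full; the proofs are below) =====
def Claim_equal_possible_team_members : Prop := ∀ (groupList : List (List String)) (Studentlist : List String), Dom_possible_team_members groupList Studentlist → Pre_possible_team_members groupList Studentlist → Spec_possible_team_members groupList Studentlist (possible_team_members groupList Studentlist)

-- ===== LEMMAS AND PROOFS =====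


def pvPair (p0 s : String) : List String := PySem.List.sorted [p0, s] (fun x => x) false
def pvTriple (p0 x y : String) : List String := PySem.List.sorted [p0, x, y] (fun x => x) false

theorem pvPair_perm (p0 s : String) : (pvPair p0 s).Perm [p0, s] := PySem.List.sorted_perm _ _ _
theorem pvTriple_perm (p0 x y : String) : (pvTriple p0 x y).Perm [p0, x, y] := PySem.List.sorted_perm _ _ _

theorem pvPair_inj {p0 s s' : String} (h : pvPair p0 s = pvPair p0 s') : s = s' ∨ s = p0 ∨ s' = p0 := by
  by_cases hs : s = p0
  · exact Or.inr (Or.inl hs)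
  have hp : ([p0, s] : List String).Perm [p0, s'] :=
    (pvPair_perm p0 s).symm.trans (h ▸ pvPair_perm p0 s')
  have h2 := hp.cons_inv
  have := h2.mem_iff.mp (List.mem_singleton_self s)
  exact Or.inl (by simpa using this)

theorem pvTriple_symm (p0 x y : String) : pvTriple p0 x y = pvTriple p0 y x := by
  have hperm : ([p0, x, y] : List String).Perm [p0, y, x] :=
    List.Perm.cons p0 (List.Perm.swap y x [])
  have h1 := PySem.List.sorted_eq_sorted_of_perm (κ := String) [p0,x,y] [p0,y,x] (fun x => x) (fun a b h => h) hperm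
  exact h1

theorem pvTriple_inj {p0 x y x' y' : String} (h : pvTriple p0 x y = pvTriple p0 x' y') : (x = x' ∧ y = y') ∨ (x = y' ∧ y = x') := by
  have hp : ([p0, x, y] : List String).Perm [p0, x', y'] :=
    (pvTriple_perm p0 x y).symm.trans (h ▸ pvTriple_perm p0 x' y')
  have h2 : ([x, y] : List String).Perm [x', y'] := hp.cons_inv
  have hxm : x ∈ ([x', y'] : List String) := h2.mem_iff.mp (by simp)
  rcases List.mem_cons.mp hxm with rfl | hxm
  · left
    refine ⟨rfl, ?_⟩
    have h3 := h2.cons_inv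
    simpa using h3.mem_iff.mp (List.mem_singleton_self y)
  · right
    have hxy' : x = y' := by simpa using hxm
    subst hxy'
    have h3 : ([x', x] : List String).Perm [x, x'] := List.Perm.swap x x' []
    have h4 : ([x, y] : List String).Perm [x, x'] := h2.trans h3
    have h5 := h4.cons_inv
    exact ⟨rfl, by simpa using h5.mem_iff.mp (List.mem_singleton_self y)⟩

theorem mem_pvPair {p0 x t : String} : t ∈ pvPair p0 x ↔ t = p0 ∨ t = x := by
  rw [pvPair, PySem.List.mem_sorted]; simp

theorem pvPair_shape (p0 x : String) : ∃ a b, pvPair p0 x = [a, b] := by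
  have hl : (pvPair p0 x).length = 2 := by rw [pvPair, PySem.List.length_sorted]; rfl
  match hp : pvPair p0 x, hl with
  | [a, b], _ => exact ⟨a, b, rfl⟩

def pvStepA3 (fl : List String) (p0 x : String) (th : List (List String)) (t : String) : List (List String) :=
  if t ∉ fl ∧ t ∉ pvPair p0 x then
    (if pvTriple p0 x t ∉ th then th ++ [pvTriple p0 x t] else th)
  else th

theorem pvStepA3_norm (fl : List String) (p0 x : String) (th : List (List String)) (t : String) :
    (if t ∉ fl ∧ t ∉ pvPair p0 x then
      if PySem.List.sorted [PySem.List.pyGetD (pvPair p0 x) 0 "", PySem.List.pyGetD (pvPair p0 x) 1 "", t] (fun z => z) false ∉ th then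
        th ++ [PySem.List.sorted [PySem.List.pyGetD (pvPair p0 x) 0 "", PySem.List.pyGetD (pvPair p0 x) 1 "", t] (fun z => z) false]
      else th
    else th) = pvStepA3 fl p0 x th t := by
  obtain ⟨a, b, hab⟩ := pvPair_shape p0 x
  have hperm : ([a, b] : List String).Perm [p0, x] := hab ▸ pvPair_perm p0 x
  have hperm3 : ([a, b, t] : List String).Perm [p0, x, t] := by
    have := hperm.append_right [t]
    simpa using this
  have hsort : PySem.List.sorted [a, b, t] (fun z : String => z) false = pvTriple p0 x t := by
    have h1 := PySem.List.sorted_eq_sorted_of_perm (κ := String) [a,b,t] [p0,x,t] (fun z => z) (fun u v h => h) hperm3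
    exact h1
  rw [pvStepA3, hab]
  simp only [PySem.List.pyGetD_ofNat', List.getD_cons_succ, List.getD_cons_zero, hsort]

-- pairs of later elements, in A's emission order
def pvCombos (p0 : String) : List String → List (List String)
  | [] => []
  | x :: xs => xs.map (pvTriple p0 x) ++ pvCombos p0 xs

-- pairs contributed by the processed prefix u of the availability list
def pvP (p0 : String) : List String → List String → List (List String)
  | [], _ => []
  | a :: u, v => (u ++ v).map (pvTriple p0 a) ++ pvP p0 u v

theorem pvP_nil (p0 : String) : ∀ u, pvP p0 u [] = pvCombos p0 u := by
  intro u
  induction u with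
  | nil => rfl
  | cons a u ih => simp [pvP, pvCombos, ih]

theorem pvP_snoc (p0 : String) : ∀ (u : List String) (x : String) (v : List String),
    pvP p0 (u ++ [x]) v = pvP p0 u (x :: v) ++ v.map (pvTriple p0 x) := by
  intro u
  induction u with
  | nil => intro x v; simp [pvP]
  | cons a u ih => intro x v; simp [pvP, ih, List.append_assoc]

theorem mem_pvP {fl : List String} {p0 : String} :
    ∀ (u : List String) {v : List String} {x t : String}, x ∉ fl → t ∉ fl →
      (∀ a ∈ u, a ∉ fl) → (∀ b ∈ v, b ∉ fl) → x ∈ v → x ∉ u → t ≠ x →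
      (pvTriple p0 x t ∈ pvP p0 u v ↔ t ∈ u) := by
  intro u
  induction u with
  | nil => intro v x t _ _ _ _ _ _ _; simp [pvP]
  | cons a u ih =>
    intro v x t hx ht hu hv hxv hxu htx
    have hane : a ∉ fl := hu a (by simp)
    have hax : a ≠ x := fun h => hxu (by simp [h])
    constructor
    · intro hmem
      rw [pvP, List.mem_append] at hmem
      rcases hmem with hmem | hmem
      · rcases List.mem_map.mp hmem with ⟨b, hb, hbe⟩
        have hbne : b ∉ fl := by
          rcases List.mem_append.mp hb with h | h
          · exact hu b (by simp [h])
          · exact hv b h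
        rcases pvTriple_inj hbe with ⟨h1, h2⟩ | ⟨h1, h2⟩
        · exact absurd h1 hax
        · simp [h1]
      · have := (ih hx ht (fun c hc => hu c (by simp [hc])) hv hxv
          (fun h => hxu (by simp [h])) htx).mp hmem
        simp [this]
    · intro hmem
      rcases List.mem_cons.mp hmem with rfl | hmem
      · rw [pvP, List.mem_append]
        left
        refine List.mem_map.mpr ⟨x, ?_, (pvTriple_symm p0 t x)⟩
        exact List.mem_append.mpr (Or.inr hxv)
      · rw [pvP, List.mem_append]
        right
        exact (ih hx ht (fun c hc => hu c (by simp [hc])) hv hxv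
          (fun h => hxu (by simp [h])) htx).mpr hmem

def pvAvailStep (fl : List String) (a : List String) (t : String) : List String :=
  if t ∉ fl ∧ t ∉ a then a ++ [t] else a

-- A's pair-building loop builds the pairs of the availability fold
theorem pvTwoLoop {fl : List String} {p0 : String} (hp0 : p0 ∈ fl) :
    ∀ (sl av : List String), (∀ t ∈ av, t ∉ fl) →
      sl.foldl (fun tm student =>
        if student ∉ fl then
          if pvPair p0 student ∉ tm then tm ++ [pvPair p0 student] else tm
        else tm) (av.map (pvPair p0))
      = (sl.foldl (pvAvailStep fl) av).map (pvPair p0) := by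
  intro sl
  induction sl with
  | nil => intro av _; rfl
  | cons t sl ih =>
    intro av hav
    by_cases ht : t ∈ fl
    · have e1 : pvAvailStep fl av t = av := by simp [pvAvailStep, ht]
      have e2 : (if t ∉ fl then
          if pvPair p0 t ∉ av.map (pvPair p0) then av.map (pvPair p0) ++ [pvPair p0 t]
          else av.map (pvPair p0)
        else av.map (pvPair p0)) = av.map (pvPair p0) := by simp [ht]
      simp only [List.foldl_cons, e1, e2]
      exact ih av hav
    · have hmem : pvPair p0 t ∈ av.map (pvPair p0) ↔ t ∈ av := by
        constructor
        · intro h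
          rcases List.mem_map.mp h with ⟨s, hs, hse⟩
          rcases pvPair_inj hse with rfl | he | he
          · exact hs
          · exact absurd (he ▸ hp0) (hav s hs)
          · exact absurd (he ▸ hp0) ht
        · intro h; exact List.mem_map.mpr ⟨t, h, rfl⟩
      by_cases hm : t ∈ av
      · have e1 : pvAvailStep fl av t = av := by simp [pvAvailStep, hm]
        have e2 : (if t ∉ fl then
            if pvPair p0 t ∉ av.map (pvPair p0) then av.map (pvPair p0) ++ [pvPair p0 t]
            else av.map (pvPair p0)
          else av.map (pvPair p0)) = av.map (pvPair p0) := by simp [ht, hmem, hm]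
        simp only [List.foldl_cons, e1, e2]
        exact ih av hav
      · have e1 : pvAvailStep fl av t = av ++ [t] := by simp [pvAvailStep, ht, hm]
        have e2 : (if t ∉ fl then
            if pvPair p0 t ∉ av.map (pvPair p0) then av.map (pvPair p0) ++ [pvPair p0 t]
            else av.map (pvPair p0)
          else av.map (pvPair p0)) = (av ++ [t]).map (pvPair p0) := by
          simp [ht, hmem, hm]
        simp only [List.foldl_cons, e1, e2]
        refine ih (av ++ [t]) ?_
        intro c hc
        rcases List.mem_append.mp hc with h | h
        · exact hav c h
        · have : c = t := by simpa using h
          exact this ▸ ht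

-- refining the availability fold by a pointwise condition is filtering its result
theorem pvFoldFilter (fl : List String) (Q : String → Prop) [DecidablePred Q] :
    ∀ (sl av : List String),
      sl.foldl (fun a t => if t ∉ fl ∧ (Q t ∧ t ∉ a) then a ++ [t] else a)
          (av.filter (fun t => decide (Q t)))
        = (sl.foldl (pvAvailStep fl) av).filter (fun t => decide (Q t)) := by
  intro sl
  induction sl with
  | nil => intro av; rfl
  | cons t sl ih =>
    intro av
    simp only [List.foldl_cons]
    by_cases ht : t ∈ fl
    · have e1 : pvAvailStep fl av t = av := by simp [pvAvailStep, ht]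
      have e2 : (if t ∉ fl ∧ (Q t ∧ t ∉ av.filter (fun t => decide (Q t))) then
          av.filter (fun t => decide (Q t)) ++ [t] else av.filter (fun t => decide (Q t)))
          = av.filter (fun t => decide (Q t)) := by simp [ht]
      rw [e1, e2]; exact ih av
    · by_cases hm : t ∈ av
      · have e1 : pvAvailStep fl av t = av := by simp [pvAvailStep, hm]
        have e2 : (if t ∉ fl ∧ (Q t ∧ t ∉ av.filter (fun t => decide (Q t))) then
            av.filter (fun t => decide (Q t)) ++ [t] else av.filter (fun t => decide (Q t)))
            = av.filter (fun t => decide (Q t)) := by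
          by_cases hQ : Q t
          · simp [List.mem_filter, hm, hQ]
          · simp [hQ]
        rw [e1, e2]; exact ih av
      · have e1 : pvAvailStep fl av t = av ++ [t] := by simp [pvAvailStep, ht, hm]
        have hnm : t ∉ av.filter (fun t => decide (Q t)) := fun h => hm (List.mem_of_mem_filter h)
        by_cases hQ : Q t
        · have e2 : (if t ∉ fl ∧ (Q t ∧ t ∉ av.filter (fun t => decide (Q t))) then
              av.filter (fun t => decide (Q t)) ++ [t] else av.filter (fun t => decide (Q t)))
              = (av ++ [t]).filter (fun t => decide (Q t)) := by
            simp [ht, hQ, hnm, List.filter_append]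
          rw [e1, e2]; exact ih (av ++ [t])
        · have e2 : (if t ∉ fl ∧ (Q t ∧ t ∉ av.filter (fun t => decide (Q t))) then
              av.filter (fun t => decide (Q t)) ++ [t] else av.filter (fun t => decide (Q t)))
              = (av ++ [t]).filter (fun t => decide (Q t)) := by
            simp [hQ, List.filter_append]
          rw [e1, e2]; exact ih (av ++ [t])

-- the availability fold is the ordered dedup of the unassigned students
theorem pvFold_eq_dedup (fl : List String) :
    ∀ (sl av : List String),
      sl.foldl (pvAvailStep fl) av = (sl.filter (fun s => decide (s ∉ fl))).foldl PySem.Set.add av := by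
  intro sl
  induction sl with
  | nil => intro av; rfl
  | cons t sl ih =>
    intro av
    simp only [List.foldl_cons, List.filter_cons]
    by_cases ht : t ∈ fl
    · have e1 : pvAvailStep fl av t = av := by simp [pvAvailStep, ht]
      simp only [ht, not_true_eq_false, decide_false, if_false, e1]
      exact ih av
    · have e1 : pvAvailStep fl av t = PySem.Set.add av t := by
        simp only [pvAvailStep, PySem.Set.add, PySem.Set.contains]
        by_cases hm : t ∈ av
        · simp [ht, hm, List.contains_iff_mem]
        · simp [ht, hm, List.contains_iff_mem]
      simp only [ht, not_false_eq_true, decide_true, if_true, List.foldl_cons, e1]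
      exact ih (PySem.Set.add av t)

theorem pvAllAssigned {fl : List String} {p0 : String} :
    ∀ (sl : List String), (∀ s ∈ sl, s ∈ fl) → ∀ tm : List (List String),
      sl.foldl (fun tm student =>
        if student ∉ fl then
          if pvPair p0 student ∉ tm then tm ++ [pvPair p0 student] else tm
        else tm) tm = tm := by
  intro sl
  induction sl with
  | nil => intro _ _; rfl
  | cons t sl ih =>
    intro h tm
    have ht : t ∈ fl := h t (by simp)
    simp only [List.foldl_cons, ht, not_true_eq_false, if_false]
    exact ih (fun s hs => h s (by simp [hs])) tm

-- one round of A's triple loop: it appends the triples of the fresh partners of x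
theorem pvInnerLoop {fl : List String} {p0 x : String} {u v : List String}
    (hp0 : p0 ∈ fl) (hx : x ∉ fl) (hu : ∀ a ∈ u, a ∉ fl) (hv : ∀ b ∈ v, b ∉ fl)
    (hxv : x ∈ v) (hxu : x ∉ u) :
    ∀ (sl w : List String), (∀ b ∈ w, b ∉ fl ∧ b ≠ x) →
      sl.foldl (pvStepA3 fl p0 x) (pvP p0 u v ++ w.map (pvTriple p0 x))
        = pvP p0 u v ++ ((sl.foldl (fun a t => if t ∉ fl ∧ ((t ≠ x ∧ t ∉ u) ∧ t ∉ a) then a ++ [t] else a) w).map (pvTriple p0 x)) := by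
  intro sl
  induction sl with
  | nil => intro w _; rfl
  | cons t sl ih =>
    intro w hw
    simp only [List.foldl_cons]
    by_cases ht : t ∈ fl
    · have e1 : pvStepA3 fl p0 x (pvP p0 u v ++ w.map (pvTriple p0 x)) t
          = pvP p0 u v ++ w.map (pvTriple p0 x) := by simp [pvStepA3, ht]
      have e2 : (if t ∉ fl ∧ ((t ≠ x ∧ t ∉ u) ∧ t ∉ w) then w ++ [t] else w) = w := by simp [ht]
      rw [e1, e2]; exact ih w hw
    · by_cases htx : t = x
      · have e1 : pvStepA3 fl p0 x (pvP p0 u v ++ w.map (pvTriple p0 x)) t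
            = pvP p0 u v ++ w.map (pvTriple p0 x) := by
          simp [pvStepA3, mem_pvPair, htx]
        have e2 : (if t ∉ fl ∧ ((t ≠ x ∧ t ∉ u) ∧ t ∉ w) then w ++ [t] else w) = w := by simp [htx]
        rw [e1, e2]; exact ih w hw
      · have htp0 : t ≠ p0 := fun h => ht (h ▸ hp0)
        have hmem : pvTriple p0 x t ∈ pvP p0 u v ++ w.map (pvTriple p0 x) ↔ (t ∈ u ∨ t ∈ w) := by
          rw [List.mem_append]
          have h1 := mem_pvP (fl := fl) (p0 := p0) u hx ht hu hv hxv hxu htx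
          have h2 : pvTriple p0 x t ∈ w.map (pvTriple p0 x) ↔ t ∈ w := by
            constructor
            · intro h
              rcases List.mem_map.mp h with ⟨b, hb, hbe⟩
              rcases pvTriple_inj hbe with ⟨_, rfl⟩ | ⟨he, _⟩
              · exact hb
              · exact absurd he.symm htx
            · intro h; exact List.mem_map.mpr ⟨t, h, rfl⟩
          rw [h1, h2]
        by_cases hm : t ∈ u ∨ t ∈ w
        · have e1 : pvStepA3 fl p0 x (pvP p0 u v ++ w.map (pvTriple p0 x)) t
              = pvP p0 u v ++ w.map (pvTriple p0 x) := by
            have : pvTriple p0 x t ∈ pvP p0 u v ++ w.map (pvTriple p0 x) := hmem.mpr hm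
            simp [pvStepA3, this]
          have e2 : (if t ∉ fl ∧ ((t ≠ x ∧ t ∉ u) ∧ t ∉ w) then w ++ [t] else w) = w := by
            rcases hm with hm | hm <;> simp [hm]
          rw [e1, e2]; exact ih w hw
        · push_neg at hm
          have e1 : pvStepA3 fl p0 x (pvP p0 u v ++ w.map (pvTriple p0 x)) t
              = pvP p0 u v ++ (w ++ [t]).map (pvTriple p0 x) := by
            have hnm : pvTriple p0 x t ∉ pvP p0 u v ++ w.map (pvTriple p0 x) := by
              rw [hmem]; push_neg; exact hm
            have hcond : t ∉ fl ∧ t ∉ pvPair p0 x := by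
              refine ⟨ht, ?_⟩
              rw [mem_pvPair]; push_neg; exact ⟨htp0, htx⟩
            simp [pvStepA3, hcond, hnm, List.append_assoc]
          have e2 : (if t ∉ fl ∧ ((t ≠ x ∧ t ∉ u) ∧ t ∉ w) then w ++ [t] else w) = w ++ [t] := by
            simp [ht, htx, hm.1, hm.2]
          rw [e1, e2]
          refine ih (w ++ [t]) ?_
          intro b hb
          rcases List.mem_append.mp hb with h | h
          · exact hw b h
          · have : b = t := by simpa using h
            exact this ▸ ⟨ht, htx⟩

def pvAvail (fl sl : List String) : List String := sl.foldl (pvAvailStep fl) []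

theorem pvAvail_eq (fl sl : List String) :
    pvAvail fl sl = PySem.Set.ofList (sl.filter (fun s => decide (s ∉ fl))) := by
  rw [pvAvail, pvFold_eq_dedup, PySem.Set.ofList_eq_foldl]

theorem pvAvail_nodup (fl sl : List String) : (pvAvail fl sl).Nodup := by
  rw [pvAvail_eq, ← PySem.List.dedup_eq_ofList]
  exact PySem.List.nodup_dedup _

theorem mem_pvAvail {fl sl : List String} {t : String} :
    t ∈ pvAvail fl sl ↔ t ∈ sl ∧ t ∉ fl := by
  rw [pvAvail_eq, PySem.Set.mem_ofList, List.mem_filter]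
  simp

-- A's triple loop over the availability list produces the combination pairs
theorem pvOuterLoop {fl : List String} {p0 : String} {sl : List String} (hp0 : p0 ∈ fl) :
    ∀ (v u : List String), u ++ v = pvAvail fl sl →
      v.foldl (fun th x => sl.foldl (pvStepA3 fl p0 x) th) (pvP p0 u v) = pvP p0 (u ++ v) [] := by
  intro v
  induction v with
  | nil => intro u _; simp
  | cons x v ih =>
    intro u huv
    have hnd : (u ++ x :: v).Nodup := huv ▸ pvAvail_nodup fl sl
    have hgood : ∀ a ∈ u ++ x :: v, a ∉ fl := by
      intro a ha
      exact (mem_pvAvail.mp (huv ▸ ha)).2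
    have hx : x ∉ fl := hgood x (by simp)
    have hu : ∀ a ∈ u, a ∉ fl := fun a ha => hgood a (by simp [ha])
    have hv : ∀ b ∈ x :: v, b ∉ fl := fun b hb => hgood b (by simp [hb])
    have hxu : x ∉ u := by
      intro h
      exact (List.disjoint_of_nodup_append hnd) h (by simp)
    have hxv : x ∉ v := by
      have h := List.Nodup.of_append_right hnd
      rw [List.nodup_cons] at h
      exact h.1
    have hdisj : ∀ b ∈ v, b ∉ u := by
      intro b hb h
      exact (List.disjoint_of_nodup_append hnd) h (by simp [hb])
    simp only [List.foldl_cons]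
    have hstep := pvInnerLoop (fl := fl) (p0 := p0) (x := x) (u := u) (v := x :: v)
      hp0 hx hu hv (by simp) hxu sl [] (by simp)
    simp only [List.map_nil, List.append_nil] at hstep
    rw [hstep]
    have hfilterQ := pvFoldFilter fl (fun t => t ≠ x ∧ t ∉ u) sl []
    simp only [List.filter_nil] at hfilterQ
    have hfQ : sl.foldl (fun a t => if t ∉ fl ∧ ((t ≠ x ∧ t ∉ u) ∧ t ∉ a) then a ++ [t] else a) []
        = (pvAvail fl sl).filter (fun t => decide (t ≠ x ∧ t ∉ u)) := by
      rw [hfilterQ]; rfl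
    have hfv : (pvAvail fl sl).filter (fun t => decide (t ≠ x ∧ t ∉ u)) = v := by
      rw [← huv, List.filter_append, List.filter_cons]
      have h1 : u.filter (fun t => decide (t ≠ x ∧ t ∉ u)) = [] := by
        rw [List.filter_eq_nil_iff]
        intro a ha
        simp [ha]
      have h2 : v.filter (fun t => decide (t ≠ x ∧ t ∉ u)) = v := by
        rw [List.filter_eq_self]
        intro b hb
        have hbx : ¬ b = x := fun h => hxv (h ▸ hb)
        simp [hbx, hdisj b hb]
      rw [h1, if_neg (by simp), h2]
      rfl
    rw [hfQ, hfv, ← pvP_snoc]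
    have := ih (u ++ [x]) (by simpa using huv)
    simpa using this

theorem pvShiftRange (a b : Int) :
    PySem.List.pyRange (a + 1) (b + 1) 1 = (PySem.List.pyRange a b 1).map (· + 1) := by
  rw [PySem.List.pyRange_one, PySem.List.pyRange_one, List.map_map]
  have hn : (b + 1 - (a + 1)).toNat = (b - a).toNat := by omega
  rw [hn]
  refine List.map_congr_left ?_
  intro k _
  simp only [Function.comp_apply]
  ring

theorem pvShiftGet {α : Type} (x : α) (xs : List α) (k : Int) (h : 0 ≤ k) (d : α) :
    PySem.List.pyGetD (x :: xs) (k + 1) d = PySem.List.pyGetD xs k d := by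
  obtain ⟨m, rfl⟩ : ∃ m : Nat, k = (m : Int) := ⟨k.toNat, (Int.toNat_of_nonneg h).symm⟩
  have : ((m : Int) + 1) = ((m + 1 : Nat) : Int) := by push_cast; ring
  rw [this, PySem.List.pyGetD_natCast, PySem.List.pyGetD_natCast, List.getD_cons_succ]

theorem pvRangesCombos (p0 : String) :
    ∀ l : List String,
      (PySem.List.pyRange 0 (l.length : Int) 1).flatMap (fun i =>
        (PySem.List.pyRange (i + 1) (l.length : Int) 1).map (fun j =>
          pvTriple p0 (PySem.List.pyGetD l i "") (PySem.List.pyGetD l j "")))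
      = pvCombos p0 l := by
  intro l
  induction l with
  | nil => simp [PySem.List.pyRange_one_eq_nil, pvCombos]
  | cons x xs ih =>
    have hlen : ((x :: xs).length : Int) = (xs.length : Int) + 1 := by simp
    have hcons : PySem.List.pyRange 0 ((x :: xs).length : Int) 1
        = 0 :: PySem.List.pyRange 1 ((x :: xs).length : Int) 1 :=
      PySem.List.pyRange_one_cons (by simp)
    have hshift : PySem.List.pyRange 1 ((x :: xs).length : Int) 1
        = (PySem.List.pyRange 0 (xs.length : Int) 1).map (· + 1) := by
      rw [hlen]
      have := pvShiftRange 0 (xs.length : Int)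
      simpa using this
    rw [hcons, List.flatMap_cons, hshift]
    have hhead : (PySem.List.pyRange (0 + 1) ((x :: xs).length : Int) 1).map (fun j =>
          pvTriple p0 (PySem.List.pyGetD (x :: xs) 0 "") (PySem.List.pyGetD (x :: xs) j ""))
        = xs.map (pvTriple p0 x) := by
      rw [show ((0 : Int) + 1) = 1 by ring, hshift, List.map_map]
      have h1 : ∀ j ∈ PySem.List.pyRange 0 (xs.length : Int) 1,
          ((fun j => pvTriple p0 (PySem.List.pyGetD (x :: xs) 0 "") (PySem.List.pyGetD (x :: xs) j "")) ∘ (· + 1)) j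
          = pvTriple p0 x (PySem.List.pyGetD xs j "") := by
        intro j hj
        have hj0 : 0 ≤ j := (PySem.List.mem_pyRange_one.mp hj).1
        simp only [Function.comp_apply, PySem.List.pyGetD_zero_cons, pvShiftGet x xs j hj0]
      rw [List.map_congr_left h1]
      have h2 : xs.map (pvTriple p0 x)
          = ((PySem.List.pyRange 0 (PySem.List.len xs) 1).map (fun j => PySem.List.pyGetD xs j "")).map (pvTriple p0 x) := by
        rw [PySem.List.map_pyGetD_pyRange_zero]
      rw [h2, List.map_map]
      rfl
    rw [hhead]
    congr 1
    -- tail: reindex the remaining flatMap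
    rw [List.flatMap_map]
    have h3 : ∀ i ∈ PySem.List.pyRange 0 (xs.length : Int) 1,
        ((fun i => (PySem.List.pyRange (i + 1) ((x :: xs).length : Int) 1).map (fun j =>
            pvTriple p0 (PySem.List.pyGetD (x :: xs) i "") (PySem.List.pyGetD (x :: xs) j ""))) ∘ (· + 1)) i
        = (PySem.List.pyRange (i + 1) ((xs.length : Int)) 1).map (fun j =>
            pvTriple p0 (PySem.List.pyGetD xs i "") (PySem.List.pyGetD xs j "")) := by
      intro i hi
      have hi0 : 0 ≤ i := (PySem.List.mem_pyRange_one.mp hi).1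
      simp only [Function.comp_apply]
      rw [show (i + 1 + 1 : Int) = ((i + 1) + 1) by ring, hlen, pvShiftRange (i + 1) (xs.length : Int),
        List.map_map]
      rw [pvShiftGet x xs i hi0]
      refine List.map_congr_left ?_
      intro j hj
      have hj0 : 0 ≤ j := le_trans (by omega) (PySem.List.mem_pyRange_one.mp hj).1
      simp only [Function.comp_apply, pvShiftGet x xs j hj0]
    calc (PySem.List.pyRange 0 (xs.length : Int) 1).flatMap
          ((fun i => (PySem.List.pyRange (i + 1) ((x :: xs).length : Int) 1).map (fun j =>
            pvTriple p0 (PySem.List.pyGetD (x :: xs) i "") (PySem.List.pyGetD (x :: xs) j ""))) ∘ (· + 1))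
        = (PySem.List.pyRange 0 (xs.length : Int) 1).flatMap (fun i =>
            (PySem.List.pyRange (i + 1) ((xs.length : Int)) 1).map (fun j =>
              pvTriple p0 (PySem.List.pyGetD xs i "") (PySem.List.pyGetD xs j ""))) := by
          rw [List.flatMap_def, List.flatMap_def, List.map_congr_left h3]
      _ = pvCombos p0 xs := ih


theorem pvFinalGroups (gl : List (List String)) :
    gl.foldl (fun acc group => group.foldl (fun a s => a ++ [s]) acc) [] = gl.flatten := by
  rw [show (fun (acc : List String) (group : List String) => group.foldl (fun a s => a ++ [s]) acc)
      = (fun (acc : List String) (group : List String) => acc ++ group) from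
    funext fun acc => funext fun g => PySem.List.foldl_append_singleton_eq_self g acc]
  rw [PySem.List.foldl_append_eq_flatten]
  rfl

theorem pvAssigned (gl : List (List String)) :
    gl.foldl (fun s group => PySem.Set.update s group) PySem.Set.empty
      = PySem.Set.ofList gl.flatten := by
  rw [PySem.Set.ofList_eq_foldl, List.foldl_flatten]
  rfl

theorem pvAvailB (gl : List (List String)) (sl : List String) :
    PySem.List.dedup (sl.filter (fun s =>
        !(PySem.Set.contains (gl.foldl (fun s group => PySem.Set.update s group) PySem.Set.empty) s)))
      = pvAvail gl.flatten sl := by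
  rw [pvAvail_eq, PySem.List.dedup_eq_ofList, pvAssigned]
  congr 1
  refine List.filter_congr ?_
  intro s _
  by_cases h : s ∈ gl.flatten
  · have : s ∈ PySem.Set.ofList gl.flatten := (PySem.Set.mem_ofList _ _).mpr h
    simp [PySem.Set.contains, h, List.elem_iff.mpr this]
  · have : s ∉ PySem.Set.ofList gl.flatten := fun hc => h ((PySem.Set.mem_ofList _ _).mp hc)
    simp only [PySem.Set.contains]
    simp [h, this]

theorem pvLastIdx (gl : List (List String)) (hgl : gl ≠ []) :
    PySem.List.pyGetD gl ((gl.length : Int) - 1) [] = gl.getLast hgl := by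
  have hpos : 0 < gl.length := List.length_pos_iff.mpr hgl
  have hcast : ((gl.length : Int) - 1) = ((gl.length - 1 : Nat) : Int) := by push_cast [hpos]; omega
  rw [hcast, PySem.List.pyGetD_natCast, List.getD_eq_getElem _ _ (by omega), List.getLast_eq_getElem]

theorem portA_empty (gl : List (List String)) (sl : List String)
    (h : ∀ s ∈ sl, s ∈ gl.flatten) : possible_team_members gl sl = gl := by
  unfold possible_team_members
  simp only [pvFinalGroups]
  have h2 := pvAllAssigned (fl := gl.flatten)
    (p0 := PySem.List.pyGetD (PySem.List.pyGetD gl ((gl.length : Int) - 1) []) 0 "") sl h []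
  simp only [pvPair] at h2
  rw [h2]
  simp

theorem portB_empty (gl : List (List String)) (sl : List String)
    (h : ∀ s ∈ sl, s ∈ gl.flatten) : possible_team_members_alt gl sl = gl := by
  unfold possible_team_members_alt
  have hav : pvAvail gl.flatten sl = [] := by
    rw [pvAvail_eq]
    have : sl.filter (fun s => decide (s ∉ gl.flatten)) = [] := by
      rw [List.filter_eq_nil_iff]
      intro a ha
      simp [h a ha]
    rw [this]
    rfl
  simp only [pvAvailB, hav, List.isEmpty_nil, if_true]

theorem portA_normal (gl : List (List String)) (sl : List String) (hgl : gl ≠ [])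
    (hp0 : PySem.List.pyGetD (gl.getLast hgl) 0 "" ∈ gl.flatten) :
    possible_team_members gl sl
      = gl ++ (pvAvail gl.flatten sl).map (pvPair (PySem.List.pyGetD (gl.getLast hgl) 0 ""))
          ++ pvCombos (PySem.List.pyGetD (gl.getLast hgl) 0 "") (pvAvail gl.flatten sl) := by
  unfold possible_team_members
  simp only [pvFinalGroups, pvLastIdx gl hgl]
  have h2 := pvTwoLoop (fl := gl.flatten) hp0 sl [] (by simp)
  simp only [List.map_nil] at h2
  have h2' := h2
  simp only [pvPair] at h2'
  rw [h2']
  rw [show (List.foldl (pvAvailStep gl.flatten) [] sl) = pvAvail gl.flatten sl from rfl]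
  rw [PySem.List.foldl_append_singleton_eq_self, PySem.List.foldl_append_singleton_eq_self,
    List.foldl_map]
  simp only [pvStepA3_norm]
  have hout := pvOuterLoop (fl := gl.flatten) (sl := sl) hp0 (pvAvail gl.flatten sl) [] rfl
  simp only [pvP, List.nil_append] at hout
  rw [hout, pvP_nil]

theorem portB_normal (gl : List (List String)) (sl : List String) (hgl : gl ≠ [])
    (hne : pvAvail gl.flatten sl ≠ []) :
    possible_team_members_alt gl sl
      = gl ++ (pvAvail gl.flatten sl).map (pvPair (PySem.List.pyGetD (gl.getLast hgl) 0 ""))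
          ++ pvCombos (PySem.List.pyGetD (gl.getLast hgl) 0 "") (pvAvail gl.flatten sl) := by
  unfold possible_team_members_alt
  simp only [pvAvailB, PySem.List.pyGetD_neg_one gl [] hgl]
  rw [if_neg (by simp [List.isEmpty_iff, hne])]
  congr 1
  exact pvRangesCombos (PySem.List.pyGetD (gl.getLast hgl) 0 "") (pvAvail gl.flatten sl)

theorem mainEq (gl : List (List String)) (sl : List String) (hgl : gl ≠ [])
    (hlast : gl.getLastD [] = [] → ∀ s ∈ sl, s ∈ gl.flatten) :
    possible_team_members gl sl = possible_team_members_alt gl sl := by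
  by_cases hall : ∀ s ∈ sl, s ∈ gl.flatten
  · rw [portA_empty gl sl hall, portB_empty gl sl hall]
  · have hne : pvAvail gl.flatten sl ≠ [] := by
      push_neg at hall
      obtain ⟨s, hs, hsf⟩ := hall
      intro h
      have hmem : s ∈ pvAvail gl.flatten sl := mem_pvAvail.mpr ⟨hs, hsf⟩
      rw [h] at hmem
      exact absurd hmem (List.not_mem_nil)
    have hgd : gl.getLastD [] = gl.getLast hgl := by
      rw [List.getLastD_eq_getLast?, List.getLast?_eq_getLast hgl]
      rfl
    have hlastne : gl.getLast hgl ≠ [] := by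
      intro h
      exact hall (hlast (by rw [hgd, h]))
    have hp0 : PySem.List.pyGetD (gl.getLast hgl) 0 "" ∈ gl.flatten := by
      rcases hL : gl.getLast hgl with _ | ⟨c, rest⟩
      · exact absurd hL hlastne
      · rw [PySem.List.pyGetD_zero_cons]
        exact List.mem_flatten.mpr ⟨gl.getLast hgl, List.getLast_mem hgl, by rw [hL]; simp⟩
    rw [portA_normal gl sl hgl hp0, portB_normal gl sl hgl hne]

-- ===== VERDICT =====
theorem possible_team_members_spec : Claim_equal_possible_team_members := by
  intro groupList Studentlist _ pre
  exact mainEq groupList Studentlist pre.1 pre.2
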